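-- pv_equiv track=rewrite | github.com/vdpham326/python-data-structures | dictionary/exam_results.py | get_results_range
-- ===== SOURCE A (Python) =====
-- def get_results_range(result_dict):
--     worst, best = 0, 0
--     for score in result_dict.values():
--         if score < worst:
--             worst = score
--         if score > best:
--             best = score
--     return best - worst
-- ===== SOURCE B (Python) =====
-- def get_results_range(result_dict):
--     s = sorted(result_dict.values())
--     if not s:
--         return 0
--     return max(s[-1], 0) - min(s[0], 0)
-- ===== Notes on version B (the rewrite author's own statement) =====
-- stated objective: alternative
-- what changed: Replaces A's single combined scan tracking both extremes with sort-then-pick: sort the values once and read the range off the sorted list's endpoints clamped against 0.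
import Mathlib
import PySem

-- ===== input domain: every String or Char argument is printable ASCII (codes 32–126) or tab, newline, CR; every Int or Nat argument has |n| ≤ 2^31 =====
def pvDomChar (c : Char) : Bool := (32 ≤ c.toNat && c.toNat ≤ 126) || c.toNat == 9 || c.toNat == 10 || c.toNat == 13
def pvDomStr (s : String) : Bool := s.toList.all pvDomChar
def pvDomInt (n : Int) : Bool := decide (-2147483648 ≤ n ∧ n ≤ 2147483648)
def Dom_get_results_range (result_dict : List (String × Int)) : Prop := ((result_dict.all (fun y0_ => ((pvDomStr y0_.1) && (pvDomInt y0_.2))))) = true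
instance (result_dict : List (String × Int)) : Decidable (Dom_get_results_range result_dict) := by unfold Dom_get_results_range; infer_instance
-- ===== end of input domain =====

-- B replaces A's single combined min/max scan with sort-then-pick: sort the values and read the range from the sorted endpoints clamped against 0; objective: alternative.


-- ===== PORT A =====
-- 'for score in result_dict.values()' = fold over the second components in order;
-- state (worst, best) starts at (0, 0); the two branches in source order
def get_results_range (result_dict : List (String × Int)) : Int :=
  let st := (result_dict.map (·.2)).foldl
    (fun (wb : Int × Int) score =>
      let wb := if score < wb.1 then (score, wb.2) else wb
      if score > wb.2 then (wb.1, score) else wb)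
    (0, 0)
  st.2 - st.1

-- ===== PORT B =====
-- Source B: s = sorted(result_dict.values()); if not s: return 0; return max(s[-1],0) - min(s[0],0)
-- s[-1] of a nonempty list is its last element, s[0] its head (exact here)
def get_results_range_alt (result_dict : List (String × Int)) : Int :=
  let s := PySem.List.sorted (result_dict.map (·.2)) (fun x => x) false
  match s with
  | [] => 0
  | h :: t => max ((h :: t).getLast (by simp)) 0 - min h 0

-- ===== PRECONDITION & SPEC =====
def Spec_get_results_range (result_dict : List (String × Int)) (out : Int) : Prop := out = get_results_range_alt result_dict
instance (result_dict : List (String × Int)) (out : Int) : Decidable (Spec_get_results_range result_dict out) := by unfold Spec_get_results_range; infer_instance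

-- ===== CLAIM (what is proved, stated in full; the proofs are below) =====
def Claim_equal_get_results_range : Prop := ∀ (result_dict : List (String × Int)), Dom_get_results_range result_dict → Spec_get_results_range result_dict (get_results_range result_dict)

-- ===== LEMMAS AND PROOFS =====
-- A's combined loop, started at any (w, b), is the pair of running min/max folds.
theorem pv_loop_eq (vs : List Int) (w b : Int) (hwb : w ≤ b) :
    vs.foldl
      (fun (wb : Int × Int) score =>
        let wb := if score < wb.1 then (score, wb.2) else wb
        if score > wb.2 then (wb.1, score) else wb)
      (w, b)
    = (vs.foldl min w, vs.foldl max b) := by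
  induction vs generalizing w b with
  | nil => simp
  | cons v t ih =>
    simp only [List.foldl_cons]
    have hs : (let wb := if v < (w, b).1 then (v, (w, b).2) else (w, b);
               if v > wb.2 then (wb.1, v) else wb) = (min w v, max b v) := by
      simp only []
      split_ifs <;> (apply Prod.ext <;> simp_all <;> omega)
    rw [hs, ih (min w v) (max b v) (by omega)]

theorem pv_fold_min_const (t : List Int) (c : Int) (h : ∀ x ∈ t, c ≤ x) :
    t.foldl min c = c := by
  induction t with
  | nil => rfl
  | cons v r ih =>
    simp only [List.foldl_cons]
    have hc : min c v = c := by have := h v (by simp); omega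
    rw [hc]; exact ih (fun x hx => h x (by simp [hx]))

theorem pv_fold_max_const (t : List Int) (c : Int) (h : ∀ x ∈ t, x ≤ c) :
    t.foldl max c = c := by
  induction t with
  | nil => rfl
  | cons v r ih =>
    simp only [List.foldl_cons]
    have hc : max c v = c := by have := h v (by simp); omega
    rw [hc]; exact ih (fun x hx => h x (by simp [hx]))

-- foldl min a vs = min a L when L is a lower bound of vs that lies in vs
theorem pv_fold_min_mem (vs : List Int) (a L : Int) (hmem : L ∈ vs) (hlb : ∀ x ∈ vs, L ≤ x) :
    vs.foldl min a = min a L := by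
  induction vs generalizing a with
  | nil => simp at hmem
  | cons v t ih =>
    simp only [List.foldl_cons]
    by_cases hLt : L ∈ t
    · rw [ih (min a v) hLt (fun x hx => hlb x (by simp [hx]))]
      have := hlb v (by simp); omega
    · have hLv : L = v := (List.mem_cons.1 hmem).resolve_right hLt
      subst hLv
      rw [pv_fold_min_const t (min a L) (fun x hx => by have := hlb x (by simp [hx]); omega)]
-- foldl max a vs = max a L when L is an upper bound of vs that lies in vs
theorem pv_fold_max_mem (vs : List Int) (a L : Int) (hmem : L ∈ vs) (hub : ∀ x ∈ vs, x ≤ L) :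
    vs.foldl max a = max a L := by
  induction vs generalizing a with
  | nil => simp at hmem
  | cons v t ih =>
    simp only [List.foldl_cons]
    by_cases hLt : L ∈ t
    · rw [ih (max a v) hLt (fun x hx => hub x (by simp [hx]))]
      have := hub v (by simp); omega
    · have hLv : L = v := (List.mem_cons.1 hmem).resolve_right hLt
      subst hLv
      rw [pv_fold_max_const t (max a L) (fun x hx => by have := hub x (by simp [hx]); omega)]

-- in a ≤-pairwise list, every element is ≤ the last
theorem pv_pairwise_le_getLast (h : Int) (t : List Int)
    (hp : (h :: t).Pairwise (fun a b => a ≤ b)) :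
    ∀ y ∈ h :: t, y ≤ (h :: t).getLast (by simp) := by
  induction t generalizing h with
  | nil => intro y hy; simp at hy; simp [hy, List.getLast]
  | cons v r ih =>
    intro y hy
    have hp' : (v :: r).Pairwise (fun a b => a ≤ b) := hp.tail
    have hlast : (h :: v :: r).getLast (by simp) = (v :: r).getLast (by simp) := rfl
    rw [hlast]
    rcases List.mem_cons.1 hy with hyh | hyt
    · subst hyh
      have hyv : y ≤ v := (List.pairwise_cons.1 hp).1 v (by simp)
      exact le_trans hyv (ih v hp' v (by simp))
    · exact ih v hp' y hyt

-- ===== VERDICT (by name: the statement is the Claim_ definition above) =====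
theorem get_results_range_spec : Claim_equal_get_results_range := by
  intro d _
  unfold Spec_get_results_range get_results_range get_results_range_alt
  rw [pv_loop_eq _ 0 0 le_rfl]
  set vs := d.map (·.2) with hvs
  rcases hS : PySem.List.sorted vs (fun x => x) false with _ | ⟨h, t⟩
  · have hnil : vs = [] := (PySem.List.sorted_eq_nil_iff vs (fun x => x) false).1 hS
    simp [hnil]
  · have hperm : (h :: t).Perm vs := hS ▸ PySem.List.sorted_perm vs (fun x => x) false
    have hmemhead : h ∈ vs := hperm.mem_iff.1 (by simp)
    have hlb : ∀ y ∈ vs, h ≤ y := PySem.List.key_head_sorted_le vs (fun x => x) hS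
    have hpw : (h :: t).Pairwise (fun a b => a ≤ b) := by
      have := PySem.List.sorted_pairwise vs (fun x => x)
      rw [hS] at this; exact this
    have hmemlast : (h :: t).getLast (by simp) ∈ vs := hperm.mem_iff.1 (List.getLast_mem _)
    have hub : ∀ y ∈ vs, y ≤ (h :: t).getLast (by simp) := fun y hy =>
      pv_pairwise_le_getLast h t hpw y (hperm.mem_iff.2 hy)
    simp only []
    rw [pv_fold_min_mem vs 0 h hmemhead hlb,
        pv_fold_max_mem vs 0 ((h :: t).getLast (by simp)) hmemlast hub]
    omega
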